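-- pv_equiv track=rewrite | github.com/knighton/zipfish | proc_simpsons.py | extra_norm
-- ===== SOURCE A (Python) =====
-- def extra_norm(s: str) -> str:
--     s = s.lower()
--
--     for c in ':().?!"\'':
--         s = s.replace(c, '')
--
--     if not c.isalnum():
--         for c in s:
--             assert c.isalnum() or c in '-_ ', s
--
--     return s
-- ===== SOURCE B (Python) =====
-- _PUNCT = set(':().?!"\'')
--
--
-- def extra_norm(s: str) -> str:
--     s = s.lower()
--     out = []
--     for ch in s:
--         if ch not in _PUNCT:
--             out.append(ch)
--     s = ''.join(out)
--     for c in s: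
--         assert c.isalnum() or c in '-_ ', s
--     return s
-- ===== Notes on version B (the rewrite author's own statement) =====
-- stated objective: simpler
-- what changed: Replaces the eight sequential whole-string replace passes with a single pass that filters out the punctuation characters, and drops the vacuous guard before the validation loop (the loop variable left over from the punctuation loop is never alphanumeric, so the guard is always true) and validates unconditionally.
import Mathlib
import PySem

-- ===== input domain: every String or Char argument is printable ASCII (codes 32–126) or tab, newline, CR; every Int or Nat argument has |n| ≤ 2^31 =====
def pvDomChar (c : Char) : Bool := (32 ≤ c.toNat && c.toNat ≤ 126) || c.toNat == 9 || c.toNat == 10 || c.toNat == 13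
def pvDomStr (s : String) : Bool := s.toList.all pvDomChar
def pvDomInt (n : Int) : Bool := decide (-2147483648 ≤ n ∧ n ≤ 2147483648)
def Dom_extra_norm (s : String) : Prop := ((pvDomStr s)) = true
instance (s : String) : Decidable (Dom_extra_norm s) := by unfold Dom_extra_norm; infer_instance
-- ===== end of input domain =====

-- B is one filtering pass instead of A's eight sequential replace() passes. Return-value equivalence
-- on Pre_ (the inputs where A's assertion loop passes); the asserts never change the return value.

-- ===== PORT A =====
-- the punctuation characters A's for-loop iterates over, in order
def pvPunct : List Char := [':', '(', ')', '.', '?', '!', '"', '\'']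

def extra_norm (s : String) : String :=
  let s1 := PySem.Str.lower s
  -- for c in ':().?!"\'': s = s.replace(c, '')
  pvPunct.foldl (fun t c => PySem.Str.replace t (String.ofList [c]) "") s1
  -- the trailing assert loop raises outside Pre_ and returns s unchanged inside it

-- ===== PORT B =====
def extra_norm_alt (s : String) : String :=
  -- single pass: keep every character not in the punctuation set
  String.ofList ((PySem.Str.lower s).toList.filter (fun c => !(pvPunct.contains c)))
  -- the validation loop raises outside Pre_ and returns the string unchanged inside it

-- ===== PRECONDITION & SPEC =====
-- Pre_ excludes exactly the inputs on which A's assert raises AssertionError: a character that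
-- (after lowercasing) is neither punctuation, nor alphanumeric, nor hyphen/underscore/space.
def Pre_extra_norm (s : String) : Prop :=
  (s.toList.all (fun c => pvPunct.contains (PySem.Chars.lowerChar c)
    || PySem.Chars.isalnum (PySem.Chars.lowerChar c)
    || [' ', '-', '_'].contains (PySem.Chars.lowerChar c))) = true
instance (s : String) : Decidable (Pre_extra_norm s) := by unfold Pre_extra_norm; infer_instance

def pvWitness_extra_norm : String := "It's Fun-Time!"

def Spec_extra_norm (s : String) (out : String) : Prop := out = extra_norm_alt s
instance (s : String) (out : String) : Decidable (Spec_extra_norm s out) := by unfold Spec_extra_norm; infer_instance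

-- ===== CLAIM (what is proved, stated in full; the proofs are below) =====
def Claim_equal_extra_norm : Prop := ∀ (s : String), Dom_extra_norm s → Pre_extra_norm s → Spec_extra_norm s (extra_norm s)

-- ===== LEMMAS AND PROOFS =====

-- replace.go with a single-char pattern and empty replacement is filter
theorem pv_go_filter (c : Char) : ∀ (fuel : Nat) (l acc : List Char), l.length ≤ fuel →
    PySem.Chars.replace.go [c] [] fuel l acc = acc.reverse ++ l.filter (fun x => x != c) := by
  intro fuel
  induction fuel with
  | zero =>
    intro l acc h
    have : l = [] := List.eq_nil_of_length_eq_zero (Nat.le_zero.mp h)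
    subst this
    simp [PySem.Chars.replace.go]
  | succ n ih =>
    intro l acc h
    cases l with
    | nil => simp [PySem.Chars.replace.go]
    | cons x t =>
      simp only [PySem.Chars.replace.go]
      by_cases hx : x = c
      · subst hx
        simp only [List.isPrefixOf, beq_self_eq_true, Bool.true_and, if_pos,
          List.length_cons, List.length_nil, Nat.zero_add, List.drop_succ_cons,
          List.drop_zero, List.reverse_nil, List.nil_append]
        rw [ih t acc (by simpa using Nat.le_of_succ_le_succ h)]
        simp
      · have hpre : List.isPrefixOf [c] (x :: t) = false := by
          simp only [List.isPrefixOf, Bool.and_true, beq_eq_false_iff_ne]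
          exact fun h' => hx h'.symm
        rw [hpre]
        simp only [Bool.false_eq_true, if_false]
        rw [ih t (x :: acc) (by simpa using Nat.le_of_succ_le_succ h)]
        simp [hx]

theorem pv_replace_single (c : Char) (l : List Char) :
    PySem.Chars.replace l [c] [] = l.filter (fun x => x != c) := by
  unfold PySem.Chars.replace
  simp only [List.isEmpty_cons, Bool.false_eq_true, if_false]
  simpa using pv_go_filter c l.length l [] (le_refl _)

-- folding single-char replaces over a list of characters filters them all out
theorem pv_foldl_replace (ps : List Char) (t : String) :
    (ps.foldl (fun u c => PySem.Str.replace u (String.ofList [c]) "") t).toList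
      = t.toList.filter (fun x => !(ps.contains x)) := by
  induction ps generalizing t with
  | nil => simp
  | cons p rest ih =>
    simp only [List.foldl_cons]
    rw [ih]
    have : (PySem.Str.replace t (String.ofList [p]) "").toList
        = t.toList.filter (fun x => x != p) := by
      rw [PySem.Str.toList_replace]
      simp only [String.toList_ofList]
      exact pv_replace_single p t.toList
    rw [this, List.filter_filter]
    apply List.filter_congr
    intro x _
    by_cases hx : x = p <;> simp [hx]

-- ===== VERDICT (by name: the statement is the Claim_ definition above) =====
theorem extra_norm_spec : Claim_equal_extra_norm := by
  intro s _ _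
  unfold Spec_extra_norm extra_norm extra_norm_alt
  have h := pv_foldl_replace pvPunct (PySem.Str.lower s)
  calc pvPunct.foldl (fun t c => PySem.Str.replace t (String.ofList [c]) "") (PySem.Str.lower s)
      = String.ofList (pvPunct.foldl (fun t c => PySem.Str.replace t (String.ofList [c]) "") (PySem.Str.lower s)).toList := by
        rw [String.ofList_toList]
    _ = String.ofList ((PySem.Str.lower s).toList.filter (fun c => !(pvPunct.contains c))) := by rw [h]
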